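-- pv_equiv track=rewrite | github.com/NielsdaWheelz/ariel | src/ariel/capability_registry.py | _normalize_email_recipients
-- ===== SOURCE A (Python) =====
-- from typing import Any, Literal, Protocol
--
-- def _normalize_email_recipient(value: Any) -> str | None:
--     if not isinstance(value, str):
--         return None
--     normalized = value.strip().lower()
--     if not normalized or len(normalized) > 320:
--         return None
--     local, sep, domain = normalized.partition("@")
--     if not sep or not local or not domain or "." not in domain:
--         return None
--     if any(ch.isspace() for ch in normalized):
--         return None
--     return normalized
--
-- def _normalize_email_recipients(raw_value: Any) -> list[str] | None:
--     if raw_value is None: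
--         return []
--     if not isinstance(raw_value, list):
--         return None
--     recipients: list[str] = []
--     seen: set[str] = set()
--     for raw_entry in raw_value:
--         recipient = _normalize_email_recipient(raw_entry)
--         if recipient is None:
--             return None
--         if recipient in seen:
--             continue
--         seen.add(recipient)
--         recipients.append(recipient)
--     return recipients
-- ===== SOURCE B (Python) =====
-- def _normalize_email_recipient(value):
--     if not isinstance(value, str):
--         return None
--     normalized = value.strip().lower()
--     if not normalized or len(normalized) > 320:
--         return None
--     local, sep, domain = normalized.partition("@")
--     if not sep or not local or not domain or "." not in domain:
--         return None
--     if any(ch.isspace() for ch in normalized):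
--         return None
--     return normalized
--
--
-- def _normalize_email_recipients(raw_value):
--     if raw_value is None:
--         return []
--     if not isinstance(raw_value, list):
--         return None
--     # Traverse the entries RIGHT-TO-LEFT; each new (earlier) recipient is
--     # prepended and its later duplicates are filtered out of the partial
--     # result.  No auxiliary seen-set: dedup happens by filtering the result
--     # itself, and first-seen order falls out of the right fold.
--     result = []
--     for entry in reversed(raw_value):
--         recipient = _normalize_email_recipient(entry)
--         if recipient is None:
--             return None
--         result = [recipient] + [x for x in result if x != recipient]
--     return result
-- ===== Notes on version B (the rewrite author's own statement) =====
-- stated objective: alternative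
-- what changed: Replaces A's left-to-right loop with a seen-set and append by a right-to-left fold that prepends each recipient and filters its later duplicates out of the partial result; no auxiliary seen structure.
import Mathlib
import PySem

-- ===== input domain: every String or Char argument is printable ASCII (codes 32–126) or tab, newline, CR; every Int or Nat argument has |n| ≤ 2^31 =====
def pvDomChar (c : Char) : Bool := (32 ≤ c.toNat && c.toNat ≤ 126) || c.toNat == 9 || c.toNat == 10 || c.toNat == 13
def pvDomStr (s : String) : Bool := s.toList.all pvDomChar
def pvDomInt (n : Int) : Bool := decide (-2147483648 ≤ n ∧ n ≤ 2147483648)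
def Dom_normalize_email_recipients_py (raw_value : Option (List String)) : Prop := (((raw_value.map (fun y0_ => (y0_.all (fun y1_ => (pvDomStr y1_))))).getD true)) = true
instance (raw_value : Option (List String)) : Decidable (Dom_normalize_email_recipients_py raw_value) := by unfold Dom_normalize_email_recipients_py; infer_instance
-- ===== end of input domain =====

-- ===== PORT A =====
-- B traverses the list right-to-left, prepending each recipient and filtering its later
-- duplicates out of the partial result (no seen-set); return-value equivalence.

-- shared helper: literal port of _normalize_email_recipient (kept unchanged in B, as in Source B).
-- partition("@") is ported by hand via the first-occurrence index (exact: str.partition splits at the first separator).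
def pvNormRecipient (value : String) : Option String :=
  let normalized := PySem.Chars.lower (PySem.Chars.strip value.toList)
  if normalized.length = 0 || decide (normalized.length > 320) then none
  else
    let i := PySem.Chars.find normalized ['@']
    if i < 0 then none  -- sep = "" : no '@' present
    else
      let lcl := normalized.take i.toNat
      let dom := normalized.drop (i.toNat + 1)
      if lcl.isEmpty || dom.isEmpty || !(PySem.Chars.isIn ['.'] dom) then none
      else if normalized.any PySem.Chars.isspace then none
      else some (String.ofList normalized)

-- A's loop: accumulates recipients and a seen set, returning none on the first invalid entry
def pvLoopA : List String → List String → PySem.Set String → Option (List String)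
  | [], recipients, _ => some recipients
  | raw_entry :: rest, recipients, seen =>
    match pvNormRecipient raw_entry with
    | none => none
    | some recipient =>
      if PySem.Set.contains seen recipient then pvLoopA rest recipients seen
      else pvLoopA rest (recipients ++ [recipient]) (PySem.Set.add seen recipient)

def normalize_email_recipients_py (raw_value : Option (List String)) : Option (List String) :=
  match raw_value with
  | none => some []
  | some xs => pvLoopA xs [] []

-- ===== PORT B =====
-- Source B's loop over reversed(raw_value) with 'result = [r] + [x for x in result if x != r]'
-- is exactly a right fold over the list.
def normalize_email_recipients_py_alt (raw_value : Option (List String)) : Option (List String) :=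
  match raw_value with
  | none => some []
  | some xs =>
    xs.foldr
      (fun entry acc =>
        match acc with
        | none => none
        | some result =>
          match pvNormRecipient entry with
          | none => none
          | some recipient => some (recipient :: result.filter (fun x => x != recipient)))
      (some [])

-- ===== PRECONDITION & SPEC =====
def Spec_normalize_email_recipients_py (raw_value : Option (List String)) (out : Option (List String)) : Prop := out = normalize_email_recipients_py_alt raw_value
instance (raw_value : Option (List String)) (out : Option (List String)) : Decidable (Spec_normalize_email_recipients_py raw_value out) := by unfold Spec_normalize_email_recipients_py; infer_instance

-- ===== CLAIM (what is proved, stated in full; the proofs are below) =====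
def Claim_equal_normalize_email_recipients_py : Prop := ∀ (raw_value : Option (List String)), Dom_normalize_email_recipients_py raw_value → Spec_normalize_email_recipients_py raw_value (normalize_email_recipients_py raw_value)

-- ===== LEMMAS AND PROOFS =====
-- the "prepend and filter later duplicates" recursion B's fold realises on the valid values
def pvDkf : List String → List String
  | [] => []
  | a :: t => a :: (pvDkf t).filter (fun x => x != a)

-- invariant of A's loop: with seen = recipients (as they are extended in lockstep),
-- the loop computes "none if any entry is invalid, else the seen-set updated with the values".
theorem pvLoopA_eq (xs : List String) (acc : List String) :
    pvLoopA xs acc acc =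
      if (xs.map pvNormRecipient).any Option.isNone then none
      else some (PySem.Set.update acc ((xs.map pvNormRecipient).filterMap id)) := by
  induction xs generalizing acc with
  | nil => simp [pvLoopA, PySem.Set.update]
  | cons e rest ih =>
    cases h : pvNormRecipient e with
    | none => simp [pvLoopA, h]
    | some r =>
      have hadd : ∀ b, pvLoopA rest (PySem.Set.add acc r) (PySem.Set.add acc r) = b →
          pvLoopA (e :: rest) acc acc = b := by
        intro b hb
        by_cases hm : r ∈ acc
        · have hadd : PySem.Set.add acc r = acc := by
            simp [PySem.Set.add, hm]
          simpa [pvLoopA, h, hm, hadd] using hb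
        · have hadd : PySem.Set.add acc r = acc ++ [r] := by
            simp [PySem.Set.add, hm]
          simpa [pvLoopA, h, hm, hadd] using hb
      refine hadd _ ?_
      rw [ih]
      simp [h, PySem.Set.update]

-- B's fold computes "none if any entry is invalid, else pvDkf of the values"
theorem pvFoldB_eq (xs : List String) :
    xs.foldr
      (fun entry acc =>
        match acc with
        | none => none
        | some result =>
          match pvNormRecipient entry with
          | none => none
          | some recipient => some (recipient :: result.filter (fun x => x != recipient)))
      (some []) =
      if (xs.map pvNormRecipient).any Option.isNone then none
      else some (pvDkf ((xs.map pvNormRecipient).filterMap id)) := by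
  induction xs with
  | nil => simp [pvDkf]
  | cons e rest ih =>
    rw [List.foldr_cons, ih]
    cases h : pvNormRecipient e with
    | none =>
      split <;> simp_all
    | some r =>
      by_cases hrest : (rest.map pvNormRecipient).any Option.isNone
      · simp [h, hrest]
      · simp [h, hrest, pvDkf]

-- the left-fold set construction equals the right-recursion pvDkf, generalized over the seed
theorem foldl_add_eq_dkf (t : List String) (acc : List String) :
    List.foldl PySem.Set.add acc t = acc ++ (pvDkf t).filter (fun x => decide (x ∉ acc)) := by
  induction t generalizing acc with
  | nil => simp [pvDkf]
  | cons b t ih =>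
    rw [List.foldl_cons, ih]
    by_cases hb : b ∈ acc
    · have hadd : PySem.Set.add acc b = acc := by simp [PySem.Set.add, hb]
      rw [hadd]
      simp only [pvDkf, List.filter_cons]
      have : (decide (b ∉ acc)) = false := by simp [hb]
      rw [this]
      congr 1
      rw [List.filter_filter]
      apply List.filter_congr
      intro x _
      by_cases hx : x ∈ acc
      · simp [hx]
      · have : x ≠ b := fun hxb => hx (hxb ▸ hb)
        simp [hx, this]
    · have hadd : PySem.Set.add acc b = acc ++ [b] := by simp [PySem.Set.add, hb]
      rw [hadd]
      simp only [pvDkf, List.filter_cons]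
      have : (decide (b ∉ acc)) = true := by simp [hb]
      rw [this]
      rw [List.append_assoc]
      congr 1
      simp only [List.singleton_append]
      congr 1
      rw [List.filter_filter]
      apply List.filter_congr
      intro x _
      by_cases hx : x = b
      · simp [hx]
      · simp [hx, List.mem_append]

theorem normalize_email_recipients_py_eq_alt (raw_value : Option (List String)) :
    normalize_email_recipients_py raw_value = normalize_email_recipients_py_alt raw_value := by
  cases raw_value with
  | none => rfl
  | some xs =>
    show pvLoopA xs [] [] = List.foldr _ _ xs
    rw [pvLoopA_eq, pvFoldB_eq]
    by_cases h : (xs.map pvNormRecipient).any Option.isNone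
    · rw [if_pos h, if_pos h]
    · rw [if_neg h, if_neg h]
      have h2 := foldl_add_eq_dkf ((xs.map pvNormRecipient).filterMap id) []
      simp only [List.not_mem_nil, not_false_iff, decide_true, List.filter_true,
        List.nil_append] at h2
      simp only [PySem.Set.update, h2]

-- ===== VERDICT (by name: the statement is the Claim_ definition above) =====
theorem normalize_email_recipients_py_spec : Claim_equal_normalize_email_recipients_py := by
  intro raw_value _
  exact normalize_email_recipients_py_eq_alt raw_value
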